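-- pv_equiv track=rewrite | github.com/taylandogan/interview-practice | 868_binary_gap.py | solution
-- ===== SOURCE A (Python) =====
-- def solution(n):
--     # Convert integer into a binary string
--     binary_str = "{0:b}".format(n)
--
--     # Get indices of 1's
--     indices_of_1 = []
--     for index, bit in enumerate(binary_str):
--         if bit == '1':
--             indices_of_1.append(index)
--
--     # Return 0 if the number of 1's is less than 1
--     l = len(indices_of_1)
--     if l <= 1:
--         return 0
--
--     # Find and return the maximum gap
--     max_gap = -1
--     for i in range (0, l - 1):
--         diff = indices_of_1[i + 1] - indices_of_1[i] - 1
--         max_gap = max_gap if max_gap > diff else diff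
--     return max_gap
-- ===== SOURCE B (Python) =====
-- def solution(n):
--     max_gap = 0
--     count = 0
--     seen = False
--     for ch in "{0:b}".format(n):
--         if ch == '1':
--             if seen and count > max_gap:
--                 max_gap = count
--             seen = True
--             count = 0
--         elif seen:
--             count += 1
--     return max_gap
-- ===== Notes on version B (the rewrite author's own statement) =====
-- stated objective: simpler
-- what changed: Replaces A's two-phase approach (collect all indices of 1-bits into a list, then scan consecutive index pairs for the maximal gap) with a single character scan keeping only a zero counter, a seen-a-1 flag and the running maximum, so no index list is built.
import Mathlib
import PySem

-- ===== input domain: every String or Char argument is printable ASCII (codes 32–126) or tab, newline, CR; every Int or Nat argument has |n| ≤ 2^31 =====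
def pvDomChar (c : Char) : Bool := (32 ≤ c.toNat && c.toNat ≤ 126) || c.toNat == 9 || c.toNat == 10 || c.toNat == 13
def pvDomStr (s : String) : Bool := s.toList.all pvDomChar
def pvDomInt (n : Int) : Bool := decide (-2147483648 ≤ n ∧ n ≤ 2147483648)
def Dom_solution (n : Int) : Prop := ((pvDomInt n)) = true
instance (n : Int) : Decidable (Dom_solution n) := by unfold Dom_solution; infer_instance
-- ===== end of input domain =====

-- B replaces A's two-phase algorithm (index list of 1-bits, then scan of consecutive
-- index pairs) by a single character scan with a zero counter and a seen flag (objective: simpler).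

-- ===== PORT A =====
def solution (n : Int) : Int :=
  let binary_str := PySem.Int.toBinChars n
  let indices_of_1 := (PySem.List.enumerate binary_str 0).foldl
      (fun acc ib => if ib.2 == '1' then acc ++ [ib.1] else acc) []
  let l : Int := PySem.List.len indices_of_1
  if l ≤ 1 then 0
  else (PySem.List.pyRange 0 (l - 1) 1).foldl
      (fun max_gap i =>
        let diff := PySem.List.pyGetD indices_of_1 (i + 1) 0 - PySem.List.pyGetD indices_of_1 i 0 - 1
        if max_gap > diff then max_gap else diff) (-1)

-- ===== PORT B =====
-- state: (max_gap, count, seen); one step of B's loop body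
def solutionAltStep (st : Int × Int × Bool) (ch : Char) : Int × Int × Bool :=
  if ch == '1' then
    (if st.2.2 ∧ st.2.1 > st.1 then st.2.1 else st.1, 0, true)
  else
    (st.1, if st.2.2 then st.2.1 + 1 else st.2.1, st.2.2)

def solution_alt (n : Int) : Int :=
  ((PySem.Int.toBinChars n).foldl solutionAltStep (0, 0, false)).1

-- ===== PRECONDITION & SPEC =====
def Spec_solution (n : Int) (out : Int) : Prop := out = solution_alt n
instance (n : Int) (out : Int) : Decidable (Spec_solution n out) := by unfold Spec_solution; infer_instance

-- ===== CLAIM (what is proved, stated in full; the proofs are below) =====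
def Claim_equal_solution : Prop := ∀ (n : Int), Dom_solution n → Spec_solution n (solution n)

-- ===== LEMMAS AND PROOFS =====

-- indices of '1' in s, starting at absolute position k
def pvOnes : List Char → Int → List Int
  | [], _ => []
  | c :: t, k => if c = '1' then k :: pvOnes t (k+1) else pvOnes t (k+1)

-- running max over gaps: for position p the gap contributes o + p, where o = -(prev+1)
def pvPm : List Int → Int → Int → Int
  | [], g, _ => g
  | p :: rest, g, o => pvPm rest (if o + p > g then o + p else g) (-(p+1))

lemma pvMaxFlip (g d : Int) : (if g > d then g else d) = (if d > g then d else g) := by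
  split_ifs <;> omega

lemma pvEnumFold : ∀ (s : List Char) (k : Int) (acc : List Int),
    (PySem.List.enumerate s k).foldl
      (fun acc ib => if ib.2 == '1' then acc ++ [ib.1] else acc) acc
    = acc ++ pvOnes s k := by
  intro s
  induction s with
  | nil => intro k acc; simp [PySem.List.enumerate_nil, pvOnes]
  | cons c t ih =>
    intro k acc
    rw [PySem.List.enumerate_cons, List.foldl_cons]
    by_cases h : c = '1'
    · rw [show (if ((k, c).2 == '1') = true then acc ++ [(k, c).1] else acc) = acc ++ [k] from by simp [h]]
      rw [ih (k+1) (acc ++ [k])]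
      rw [show pvOnes (c :: t) k = k :: pvOnes t (k+1) from by simp [pvOnes, h]]
      simp
    · rw [show (if ((k, c).2 == '1') = true then acc ++ [(k, c).1] else acc) = acc from by simp [h]]
      rw [ih (k+1) acc]
      rw [show pvOnes (c :: t) k = pvOnes t (k+1) from by simp [pvOnes, h]]

lemma pvOnes_lb : ∀ (s : List Char) (k p : Int), p ∈ pvOnes s k → k ≤ p := by
  intro s
  induction s with
  | nil => intro k p h; simp [pvOnes] at h
  | cons c t ih =>
    intro k p h
    by_cases hc : c = '1' <;> simp [pvOnes, hc] at h
    · rcases h with h | h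
      · omega
      · have := ih (k+1) p h; omega
    · have := ih (k+1) p h; omega

lemma pvOnes_cons : ∀ (s : List Char) (k p : Int) (rest : List Int),
    pvOnes s k = p :: rest → ∀ q ∈ rest, p + 1 ≤ q := by
  intro s
  induction s with
  | nil => intro k p rest h; simp [pvOnes] at h
  | cons c t ih =>
    intro k p rest h q hq
    by_cases hc : c = '1' <;> simp [pvOnes, hc] at h
    · obtain ⟨h1, h2⟩ := h
      subst h1; subst h2
      have := pvOnes_lb t (k+1) q hq; omega
    · exact ih (k+1) p rest h q hq

lemma pvRangeFold (m : Nat) : ∀ (xs : List Int) (j : Nat) (g : Int), xs.length = j + m + 1 →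
    (PySem.List.pyRange (j : Int) ((xs.length : Int) - 1) 1).foldl
      (fun max_gap i =>
        let diff := PySem.List.pyGetD xs (i + 1) 0 - PySem.List.pyGetD xs i 0 - 1
        if max_gap > diff then max_gap else diff) g
    = pvPm (xs.drop (j+1)) g (-(xs.getD j 0 + 1)) := by
  induction m with
  | zero =>
    intro xs j g h
    rw [PySem.List.pyRange_one_eq_nil (by omega)]
    rw [List.drop_eq_nil_of_le (by omega)]
    rfl
  | succ m ih =>
    intro xs j g h
    have hj1 : j + 1 < xs.length := by omega
    rw [PySem.List.pyRange_one_cons (by omega), List.foldl_cons]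
    have hcast : (j : Int) + 1 = ((j + 1 : Nat) : Int) := by push_cast; ring
    rw [hcast]
    simp only [PySem.List.pyGetD_natCast]
    rw [ih xs (j+1) _ (by omega)]
    rw [List.drop_eq_getElem_cons hj1]
    simp only [pvPm]
    congr 1
    · rw [List.getD_eq_getElem _ _ hj1]
      rw [pvMaxFlip]
      congr 1 <;> ring_nf
    · rw [List.getD_eq_getElem _ _ hj1]

lemma pvFoldTrue : ∀ (s : List Char) (k g c : Int),
    (s.foldl solutionAltStep (g, c, true)).1 = pvPm (pvOnes s k) g (c - k) := by
  intro s
  induction s with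
  | nil => intro k g c; simp [pvPm, pvOnes]
  | cons ch t ih =>
    intro k g c
    by_cases h : ch = '1'
    · rw [List.foldl_cons]
      have hstep : solutionAltStep (g, c, true) ch
          = ((if c > g then c else g), 0, true) := by
        simp [solutionAltStep, h]
      rw [hstep, ih (k+1)]
      rw [show pvOnes (ch :: t) k = k :: pvOnes t (k+1) from by simp [pvOnes, h]]
      simp only [pvPm]
      rw [show c - k + k = c from by ring, show (0 : Int) - (k + 1) = -(k+1) from by ring]
    · rw [List.foldl_cons]
      have hstep : solutionAltStep (g, c, true) ch = (g, c + 1, true) := by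
        simp [solutionAltStep, h]
      rw [hstep, ih (k+1)]
      rw [show pvOnes (ch :: t) k = pvOnes t (k+1) from by simp [pvOnes, h]]
      congr 1
      ring

lemma pvFoldFalse : ∀ (s : List Char) (k g c : Int),
    (s.foldl solutionAltStep (g, c, false)).1
    = (match pvOnes s k with
       | [] => g
       | p :: rest => pvPm rest g (-(p+1))) := by
  intro s
  induction s with
  | nil => intro k g c; simp [pvOnes]
  | cons ch t ih =>
    intro k g c
    by_cases h : ch = '1'
    · rw [List.foldl_cons]
      have hstep : solutionAltStep (g, c, false) ch = (g, 0, true) := by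
        simp [solutionAltStep, h]
      rw [hstep, pvFoldTrue t (k+1)]
      rw [show pvOnes (ch :: t) k = k :: pvOnes t (k+1) from by simp [pvOnes, h]]
      rw [show (0 : Int) - (k + 1) = -(k+1) from by ring]
    · rw [List.foldl_cons]
      have hstep : solutionAltStep (g, c, false) ch = (g, c, false) := by
        simp [solutionAltStep, h]
      rw [hstep, ih (k+1)]
      rw [show pvOnes (ch :: t) k = pvOnes t (k+1) from by simp [pvOnes, h]]

lemma pvPm_init (q : Int) (t : List Int) (o : Int) (hq : 0 ≤ o + q) :
    pvPm (q :: t) (-1) o = pvPm (q :: t) 0 o := by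
  simp only [pvPm]
  have h1 : (if o + q > -1 then o + q else (-1 : Int)) = o + q := by split_ifs <;> omega
  have h2 : (if o + q > 0 then o + q else (0 : Int)) = o + q := by split_ifs <;> omega
  rw [h1, h2]

-- ===== VERDICT (by name: the statement is the Claim_ definition above) =====
theorem solution_spec : Claim_equal_solution := by
  intro n _
  unfold Spec_solution solution solution_alt
  generalize PySem.Int.toBinChars n = s
  simp only []
  rw [pvEnumFold s 0 []]
  rw [List.nil_append]
  rw [pvFoldFalse s 0 0 0]
  rcases hm : pvOnes s 0 with _ | ⟨p, _ | ⟨q, t⟩⟩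
  · simp [PySem.List.len]
  · simp [PySem.List.len, pvPm]
  · have hlen : (p :: q :: t).length = 0 + (t.length + 1) + 1 := by simp
    have hl : ¬ (PySem.List.len (p :: q :: t) ≤ 1) := by
      simp [PySem.List.len]
    rw [if_neg hl]
    have hq : p + 1 ≤ q := pvOnes_cons s 0 p (q :: t) hm q (by simp)
    have h0 : ((0 : Nat) : Int) = 0 := by norm_num
    have := pvRangeFold (t.length + 1) (p :: q :: t) 0 (-1) hlen
    rw [h0] at this
    have hlen2 : PySem.List.len (p :: q :: t) = ((p :: q :: t).length : Int) := by
      simp [PySem.List.len]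
    rw [hlen2, this]
    simp only [List.drop_succ_cons, List.drop_zero, List.getD_cons_zero]
    exact pvPm_init q t (-(p+1)) (by omega)
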